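-- pv_equiv track=rewrite | github.com/stefanialacatus/TrapTheMouse | Laborator_4.py | ex_6
-- ===== SOURCE A (Python) =====
-- def ex_6(list):
--     unice = set()
--     duplicate = set()
--     for item in list:
--         if item in unice:
--             duplicate.add(item)
--         else:
--             unice.add(item)
--
--     a = len(unice)
--     b = len(duplicate)
--
--     return a, b
-- ===== SOURCE B (Python) =====
-- def ex_6(list):
--     s = sorted(list)
--     n = len(s)
--     a = 0
--     b = 0
--     i = 0
--     while i < n:
--         j = i + 1
--         while j < n and s[j] == s[i]:
--             j += 1
--         a += 1
--         if j - i > 1: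
--             b += 1
--         i = j
--     return a, b
-- ===== Notes on version B (the rewrite author's own statement) =====
-- stated objective: alternative
-- what changed: Replaces the two-set membership-branching pass with sort-then-scan: sort the list, then walk maximal runs of equal adjacent elements, counting runs (distinct) and runs of length > 1 (duplicated).
import Mathlib
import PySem

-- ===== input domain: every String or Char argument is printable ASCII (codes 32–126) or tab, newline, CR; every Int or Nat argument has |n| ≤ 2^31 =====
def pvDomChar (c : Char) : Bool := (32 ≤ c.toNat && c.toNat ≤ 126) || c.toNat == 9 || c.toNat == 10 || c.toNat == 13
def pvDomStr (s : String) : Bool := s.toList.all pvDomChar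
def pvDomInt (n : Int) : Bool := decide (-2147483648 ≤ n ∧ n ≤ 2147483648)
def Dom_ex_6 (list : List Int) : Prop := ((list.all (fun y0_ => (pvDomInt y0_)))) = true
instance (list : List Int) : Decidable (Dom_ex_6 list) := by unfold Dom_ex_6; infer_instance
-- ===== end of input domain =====

-- B replaces A's one-pass two-set membership branching by sort-then-scan over maximal runs
-- of equal adjacent elements (a different algorithm, same exact result; not claimed faster).

-- ===== PORT A =====
-- one loop step of A: branch on membership in `unice`
def ex6_stepA (st : PySem.Set Int × PySem.Set Int) (item : Int) : PySem.Set Int × PySem.Set Int :=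
  if PySem.Set.contains st.1 item then (st.1, PySem.Set.add st.2 item)
  else (PySem.Set.add st.1 item, st.2)

def ex_6 (list : List Int) : Int × Int :=
  let st := list.foldl ex6_stepA (PySem.Set.empty, PySem.Set.empty)
  ((PySem.Set.len st.1 : Int), (PySem.Set.len st.2 : Int))

-- ===== PORT B =====
-- Source B's outer while loop over i, as structural recursion on the suffix s[i:]:
-- the inner `while j < n and s[j] == s[i]` consumes the run of elements equal to the head.
def ex6_scanB (a b : Int) : List Int → Int × Int
  | [] => (a, b)
  | x :: t =>
    let run := t.takeWhile (fun y => y == x)        -- s[i+1:j]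
    let rest := t.dropWhile (fun y => y == x)       -- s[j:]
    ex6_scanB (a + 1) (if ((run.length : Int) + 1) > 1 then b + 1 else b) rest
termination_by l => l.length
decreasing_by
  simpa using Nat.lt_succ_of_le (List.length_dropWhile_le _ _)

def ex_6_alt (list : List Int) : Int × Int :=
  ex6_scanB 0 0 (PySem.List.sorted list (fun x => x) false)

-- ===== PRECONDITION & SPEC =====
def Spec_ex_6 (list : List Int) (out : Int × Int) : Prop := out = ex_6_alt list
instance (list : List Int) (out : Int × Int) : Decidable (Spec_ex_6 list out) := by unfold Spec_ex_6; infer_instance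

-- ===== CLAIM (what is proved, stated in full; the proofs are below) =====
def Claim_equal_ex_6 : Prop := ∀ (list : List Int), Dom_ex_6 list → Spec_ex_6 list (ex_6 list)

-- ===== LEMMAS AND PROOFS =====

-- invariant of A's loop: the first set accumulates first occurrences, the second holds
-- exactly the values already duplicated, without duplicates itself
lemma ex6_loopA_spec (l : List Int) (u d : PySem.Set Int) (hu : u.Nodup) (hd : d.Nodup) :
    (l.foldl ex6_stepA (u, d)).1 = l.foldl PySem.Set.add u ∧
    (l.foldl ex6_stepA (u, d)).2.Nodup ∧
    (∀ x : Int, x ∈ (l.foldl ex6_stepA (u, d)).2 ↔ x ∈ d ∨ (x ∈ u ∧ x ∈ l) ∨ 2 ≤ l.count x) := by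
  induction l generalizing u d with
  | nil => exact ⟨rfl, hd, by simp⟩
  | cons a t ih =>
    by_cases hmem : a ∈ u
    · have hstep : ex6_stepA (u, d) a = (u, PySem.Set.add d a) := by
        simp [ex6_stepA, hmem]
      obtain ⟨h1, h2, h3⟩ := ih u (PySem.Set.add d a) hu (PySem.Set.nodup_add _ _ hd)
      refine ⟨?_, ?_, ?_⟩
      · simpa [hstep, PySem.Set.add_of_mem hmem] using h1
      · simpa [hstep] using h2
      · intro x
        rw [List.foldl_cons, hstep, h3, PySem.Set.mem_add]
        by_cases hxa : x = a
        · subst hxa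
          simp [hmem]
        · simp [hxa, Ne.symm hxa]
    · have hstep : ex6_stepA (u, d) a = (PySem.Set.add u a, d) := by
        simp [ex6_stepA, hmem]
      obtain ⟨h1, h2, h3⟩ := ih (PySem.Set.add u a) d (PySem.Set.nodup_add _ _ hu) hd
      refine ⟨?_, ?_, ?_⟩
      · simpa [hstep] using h1
      · simpa [hstep] using h2
      · intro x
        rw [List.foldl_cons, hstep, h3]
        by_cases hxa : x = a
        · subst hxa
          have hc : (x :: t).count x = t.count x + 1 := by simp
          constructor
          · rintro (h | ⟨-, ht⟩ | h)
            · exact Or.inl h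
            · have := List.count_pos_iff.2 ht
              exact Or.inr (Or.inr (by omega))
            · exact Or.inr (Or.inr (by omega))
          · rintro (h | ⟨hu', -⟩ | h)
            · exact Or.inl h
            · exact absurd hu' hmem
            · have ht : x ∈ t := List.count_pos_iff.1 (by omega)
              exact Or.inr (Or.inl ⟨(PySem.Set.mem_add _ _ _).2 (Or.inr rfl), ht⟩)
        · simp [hxa, PySem.Set.mem_add, Ne.symm hxa]

-- A's result characterised: (#distinct, #values occurring at least twice)
lemma exA_char (l : List Int) :
    ex_6 l = (((PySem.Set.ofList l).length : Int),
              (((PySem.Set.ofList l).filter (fun x => decide (2 ≤ l.count x))).length : Int)) := by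
  obtain ⟨h1, h2, h3⟩ := ex6_loopA_spec l PySem.Set.empty PySem.Set.empty List.nodup_nil List.nodup_nil
  have hu : (l.foldl ex6_stepA (PySem.Set.empty, PySem.Set.empty)).1 = PySem.Set.ofList l := by
    rw [h1]; rfl
  have hperm : (l.foldl ex6_stepA (PySem.Set.empty, PySem.Set.empty)).2.Perm
      ((PySem.Set.ofList l).filter (fun x => decide (2 ≤ l.count x))) := by
    rw [List.perm_ext_iff_of_nodup h2 (List.Nodup.filter _ (PySem.Set.nodup_ofList l))]
    intro x
    rw [h3, List.mem_filter, PySem.Set.mem_ofList]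
    constructor
    · rintro (h | ⟨h, -⟩ | h)
      · exact absurd h (List.not_mem_nil)
      · exact absurd h (List.not_mem_nil)
      · exact ⟨List.count_pos_iff.1 (by omega), by simpa using h⟩
    · rintro ⟨hx, hc⟩
      exact Or.inr (Or.inr (by simpa using hc))
  simp only [ex_6, PySem.Set.len, hu, hperm.length_eq]

-- the run scan on a sorted list counts distinct values and values occurring at least twice
lemma ex6_scanB_spec (s : List Int) (hs : s.Pairwise (· ≤ ·)) (a b : Int) :
    ex6_scanB a b s = (a + ((PySem.Set.ofList s).length : Int),
      b + (((PySem.Set.ofList s).filter (fun x => decide (2 ≤ s.count x))).length : Int)) := by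
  induction hn : s.length using Nat.strong_induction_on generalizing s a b with
  | _ n ih =>
    cases s with
    | nil => simp [ex6_scanB, PySem.Set.ofList]
    | cons x t =>
      subst hn
      have hsplit : t = t.takeWhile (fun y => y == x) ++ t.dropWhile (fun y => y == x) :=
        (List.takeWhile_append_dropWhile).symm
      set run := t.takeWhile (fun y => y == x) with hrun
      set rest := t.dropWhile (fun y => y == x) with hrest
      have hrunx : ∀ y ∈ run, y = x := by
        intro y hy
        simpa using List.mem_takeWhile_imp hy
      have hxt : ∀ y ∈ t, x ≤ y := fun y hy => List.rel_of_pairwise_cons hs hy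
      have hpt : t.Pairwise (· ≤ ·) := hs.of_cons
      have hprest : rest.Pairwise (· ≤ ·) := by
        rw [hsplit] at hpt; exact hpt.sublist (List.sublist_append_right _ _)
      have hxrest : x ∉ rest := by
        intro hx
        cases hr : rest with
        | nil => simp [hr] at hx
        | cons y r' =>
          have hyx : ¬ (y == x) = true := by
            have := List.head?_dropWhile_not (fun y => y == x) t
            rw [← hrest, hr] at this; simpa using this
          rcases (by simpa [hr] using hx : x = y ∨ x ∈ r') with h | h
          · exact hyx (by simp [← h])
          · have hyr : y ≤ x := by
              rw [hsplit, hr] at hpt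
              exact List.rel_of_pairwise_cons (List.pairwise_append.1 hpt).2.1 h
            have hxy : x ≤ y := hxt y (by rw [hsplit, hr]; simp)
            exact hyx (by simp [le_antisymm hxy hyr])
      -- counts in s = x :: run ++ rest
      have hcount_x : (x :: t).count x = run.length + 1 := by
        rw [hsplit]
        have : run.count x = run.length := List.count_eq_length.2 (fun y hy => by simp [hrunx y hy])
        simp [List.count_append, this, List.count_eq_zero.2 hxrest]
      have hcount_ne : ∀ y : Int, y ≠ x → (x :: t).count y = rest.count y := by
        intro y hy
        rw [hsplit]
        have : run.count y = 0 := List.count_eq_zero.2 (fun h => hy (hrunx y h))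
        simp [List.count_append, this, Ne.symm hy]
      have hmem_s : ∀ y : Int, y ∈ (x :: t) ↔ y = x ∨ y ∈ rest := by
        intro y
        rw [hsplit]
        constructor
        · intro h
          rcases (by simpa using h : y = x ∨ y ∈ run ∨ y ∈ rest) with h | h | h
          · exact Or.inl h
          · exact Or.inl (hrunx y h)
          · exact Or.inr h
        · rintro (h | h)
          · simp [h]
          · simp [h]
      -- distinct part
      have hperm1 : (PySem.Set.ofList (x :: t)).Perm (x :: PySem.Set.ofList rest) := by
        rw [List.perm_ext_iff_of_nodup (PySem.Set.nodup_ofList _)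
          (by simpa [List.nodup_cons, PySem.Set.mem_ofList] using
            And.intro hxrest (PySem.Set.nodup_ofList rest))]
        intro y
        simp [PySem.Set.mem_ofList, hmem_s y]
      -- duplicate part
      have hperm2 : ((PySem.Set.ofList (x :: t)).filter (fun y => decide (2 ≤ (x :: t).count y))).Perm
          ((if ((run.length : Int) + 1) > 1 then [x] else []) ++
            (PySem.Set.ofList rest).filter (fun y => decide (2 ≤ rest.count y))) := by
        rw [List.perm_ext_iff_of_nodup (List.Nodup.filter _ (PySem.Set.nodup_ofList _)) ?_]
        · intro y
          by_cases hyx : y = x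
          · subst hyx
            simp only [List.mem_filter, PySem.Set.mem_ofList, List.mem_append,
              decide_eq_true_eq]
            constructor
            · rintro ⟨-, hc⟩
              rw [hcount_x] at hc
              have h1 : ((run.length : Int) + 1) > 1 := by exact_mod_cast by omega
              simp [h1]
            · rintro (h | ⟨hmem, -⟩)
              · have hgt : 1 ≤ run.length := by
                  by_contra hn
                  have hz : run.length = 0 := by omega
                  rw [if_neg (by simp [hz])] at h
                  simp at h
                exact ⟨by simp, by rw [hcount_x]; omega⟩
              · exact absurd hmem hxrest
          · simp only [List.mem_filter, PySem.Set.mem_ofList, List.mem_append,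
              decide_eq_true_eq]
            rw [hcount_ne y hyx]
            constructor
            · rintro ⟨hmem, hc⟩
              rcases (hmem_s y).1 hmem with h | h
              · exact absurd h hyx
              · exact Or.inr ⟨h, hc⟩
            · rintro (h | ⟨h1, h2⟩)
              · exact absurd (by split_ifs at h <;> simpa using h) hyx
              · exact ⟨(hmem_s y).2 (Or.inr h1), h2⟩
        · refine List.Nodup.append ?_ (List.Nodup.filter _ (PySem.Set.nodup_ofList _)) ?_
          · split_ifs <;> simp
          · intro y hy hz
            have : y = x := by split_ifs at hy <;> simpa using hy
            exact hxrest (by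
              subst this
              simpa [PySem.Set.mem_ofList] using (List.mem_filter.1 hz).1)
      have hrestlen : rest.length < (x :: t).length := by
        simpa using Nat.lt_succ_of_le (List.length_dropWhile_le _ _)
      rw [ex6_scanB, ih rest.length hrestlen rest hprest _ _ rfl,
        hperm1.length_eq, hperm2.length_eq]
      simp only [List.length_cons, List.length_append]
      split_ifs with h
      · refine Prod.ext ?_ ?_ <;> simp <;> ring
      · refine Prod.ext ?_ ?_ <;> simp <;> ring
  
-- ===== VERDICT (by name: the statement is the Claim_ definition above) =====
theorem ex_6_spec : Claim_equal_ex_6 := by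
  intro l _
  show ex_6 l = ex_6_alt l
  have hs := PySem.List.sorted_pairwise (xs := l) (key := fun x : Int => x)
  have hperm : (PySem.List.sorted l (fun x => x) false).Perm l := PySem.List.sorted_perm _ _ _
  rw [exA_char, ex_6_alt, ex6_scanB_spec _ hs]
  have hset : (PySem.Set.ofList (PySem.List.sorted l (fun x => x) false)).Perm (PySem.Set.ofList l) := by
    rw [List.perm_ext_iff_of_nodup (PySem.Set.nodup_ofList _) (PySem.Set.nodup_ofList _)]
    intro y
    simp [PySem.Set.mem_ofList, hperm.mem_iff]
  have hfil : ((PySem.Set.ofList (PySem.List.sorted l (fun x => x) false)).filter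
      (fun x => decide (2 ≤ (PySem.List.sorted l (fun x => x) false).count x))).Perm
      ((PySem.Set.ofList l).filter (fun x => decide (2 ≤ l.count x))) := by
    rw [List.perm_ext_iff_of_nodup (List.Nodup.filter _ (PySem.Set.nodup_ofList _))
      (List.Nodup.filter _ (PySem.Set.nodup_ofList _))]
    intro y
    simp [List.mem_filter, PySem.Set.mem_ofList, hperm.mem_iff, hperm.count_eq]
  rw [hset.length_eq, hfil.length_eq]
  simp
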